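-- pv_equiv track=rewrite | github.com/teymurrzayev/python-naa | exam/unplaced_fruits.py | unplaced_fruits
-- ===== SOURCE A (Python) =====
-- def unplaced_fruits(fruits: list[int], baskets: list[int]) -> int:
--     unplaced = 0
--     baskets_available = baskets.copy()
--
--     for fruit in fruits:
--         placed = False
--         for i in range(len(baskets_available)):
--             if baskets_available[i] >= fruit:
--                 baskets_available[i] = -1
--                 placed = True
--                 break
--         if not placed:
--             unplaced += 1
--
--     return unplaced
-- ===== SOURCE B (Python) =====
-- def unplaced_fruits(fruits: list[int], baskets: list[int]) -> int:
--     # Segment tree over basket capacities: descend to the leftmost basket with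
--     # capacity >= fruit and set it to -1 (as the original does), instead of
--     # rescanning the basket list for every fruit.
--     if not baskets:
--         return len(fruits)
--
--     def build(seg):
--         # tree node: ("leaf", value) | ("node", maxval, left_size, left, right)
--         if len(seg) == 1:
--             return ("leaf", seg[0])
--         mid = len(seg) // 2
--         l = build(seg[:mid])
--         r = build(seg[mid:])
--         return ("node", max(l[1], r[1]), mid, l, r)
--
--     def query(t, f):
--         # leftmost index with value >= f, or None
--         if t[0] == "leaf":
--             return 0 if t[1] >= f else None
--         _, m, szl, l, r = t
--         if m < f:
--             return None
--         if l[1] >= f: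
--             return query(l, f)
--         j = query(r, f)
--         return None if j is None else szl + j
--
--     def update(t, i):
--         # set index i to -1, recomputing maxima
--         if t[0] == "leaf":
--             return ("leaf", -1)
--         _, m, szl, l, r = t
--         if i < szl:
--             l2 = update(l, i)
--             return ("node", max(l2[1], r[1]), szl, l2, r)
--         r2 = update(r, i - szl)
--         return ("node", max(l[1], r2[1]), szl, l, r2)
--
--     tree = build(baskets)
--     unplaced = 0
--     for f in fruits:
--         j = query(tree, f)
--         if j is None:
--             unplaced += 1
--         else:
--             tree = update(tree, j)
--     return unplaced
-- ===== Notes on version B (the rewrite author's own statement) =====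
-- stated objective: alternative
-- what changed: Replaces A's left-to-right rescan of the basket list for every fruit with a segment tree of subtree maxima that finds the leftmost basket with capacity >= fruit by descending the tree and updates it to -1 in place.
import Mathlib
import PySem

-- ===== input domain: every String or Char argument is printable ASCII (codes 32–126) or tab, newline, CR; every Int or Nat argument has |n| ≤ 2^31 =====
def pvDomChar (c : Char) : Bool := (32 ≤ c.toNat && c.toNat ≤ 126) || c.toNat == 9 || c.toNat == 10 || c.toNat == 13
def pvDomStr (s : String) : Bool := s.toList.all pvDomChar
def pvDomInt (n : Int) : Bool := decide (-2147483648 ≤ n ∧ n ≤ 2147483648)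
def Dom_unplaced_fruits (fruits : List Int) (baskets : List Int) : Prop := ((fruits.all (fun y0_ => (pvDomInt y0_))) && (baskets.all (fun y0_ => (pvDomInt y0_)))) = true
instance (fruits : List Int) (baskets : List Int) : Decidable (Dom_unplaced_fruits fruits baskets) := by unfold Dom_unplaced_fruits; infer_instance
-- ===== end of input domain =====

-- B replaces A's per-fruit rescan of the basket list by a segment tree of subtree maxima
-- descended to the leftmost fitting basket (objective: alternative algorithm).

-- ===== PORT A =====
-- inner 'for i in range(len(baskets_available)) … break' loop of A:
-- scan left to right, set the first basket ≥ fruit to -1, report whether one was found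
def pvAInner (fruit : Int) : List Int → List Int × Bool
  | [] => ([], false)
  | b :: rest =>
    if fruit ≤ b then ((-1) :: rest, true)
    else
      let res := pvAInner fruit rest
      (b :: res.1, res.2)

def unplaced_fruits (fruits : List Int) (baskets : List Int) : Int :=
  (fruits.foldl (fun st fruit =>
    let res := pvAInner fruit st.2
    (if res.2 then st.1 else st.1 + 1, res.1)) ((0 : Int), baskets)).1

-- ===== PORT B =====
-- segment tree node: leaf value, or node (max of subtree) (size of left subtree) l r
inductive PvTree : Type
  | leaf (v : Int)
  | node (m : Int) (szl : Nat) (l : PvTree) (r : PvTree)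
deriving DecidableEq, Repr

def pvMaxOf : PvTree → Int
  | .leaf v => v
  | .node m _ _ _ => m

def pvBuild : List Int → PvTree
  | [] => .leaf 0    -- unreachable: unplaced_fruits_alt only builds from a nonempty list
  | [v] => .leaf v
  | a :: b :: rest =>
    let bs := a :: b :: rest
    let mid := bs.length / 2
    let l := pvBuild (bs.take mid)
    let r := pvBuild (bs.drop mid)
    .node (max (pvMaxOf l) (pvMaxOf r)) mid l r
termination_by bs => bs.length
decreasing_by
  · simp [List.length_take]; omega
  · simp [List.length_drop]; omega

-- leftmost index with value ≥ f, or none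
def pvQuery : PvTree → Int → Option Nat
  | .leaf v, f => if f ≤ v then some 0 else none
  | .node m szl l r, f =>
    if m < f then none
    else if f ≤ pvMaxOf l then pvQuery l f
    else (pvQuery r f).map (fun j => szl + j)

-- set index i to -1, recomputing maxima on the path
def pvUpdate : PvTree → Nat → PvTree
  | .leaf _, _ => .leaf (-1)
  | .node _ szl l r, i =>
    if i < szl then
      let l2 := pvUpdate l i
      .node (max (pvMaxOf l2) (pvMaxOf r)) szl l2 r
    else
      let r2 := pvUpdate r (i - szl)
      .node (max (pvMaxOf l) (pvMaxOf r2)) szl l r2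

def unplaced_fruits_alt (fruits : List Int) (baskets : List Int) : Int :=
  match baskets with
  | [] => (fruits.length : Int)
  | _ :: _ =>
    (fruits.foldl (fun st f =>
      match pvQuery st.2 f with
      | none => (st.1 + 1, st.2)
      | some j => (st.1, pvUpdate st.2 j)) ((0 : Int), pvBuild baskets)).1

-- ===== PRECONDITION & SPEC =====
def Spec_unplaced_fruits (fruits : List Int) (baskets : List Int) (out : Int) : Prop := out = unplaced_fruits_alt fruits baskets
instance (fruits : List Int) (baskets : List Int) (out : Int) : Decidable (Spec_unplaced_fruits fruits baskets out) := by unfold Spec_unplaced_fruits; infer_instance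

-- ===== CLAIM (what is proved, stated in full; the proofs are below) =====
def Claim_equal_unplaced_fruits : Prop := ∀ (fruits : List Int) (baskets : List Int), Dom_unplaced_fruits fruits baskets → Spec_unplaced_fruits fruits baskets (unplaced_fruits fruits baskets)

-- ===== LEMMAS AND PROOFS =====

def pvFlat : PvTree → List Int
  | .leaf v => [v]
  | .node _ _ l r => pvFlat l ++ pvFlat r

-- the structural invariant of B's segment tree
inductive PvGood : PvTree → Prop
  | leaf (v : Int) : PvGood (.leaf v)
  | node (m : Int) (szl : Nat) (l r : PvTree) :
      PvGood l → PvGood r → szl = (pvFlat l).length →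
      m = max (pvMaxOf l) (pvMaxOf r) → PvGood (.node m szl l r)

theorem pvMaxOf_spec {t : PvTree} (h : PvGood t) (f : Int) :
    f ≤ pvMaxOf t ↔ ∃ x ∈ pvFlat t, f ≤ x := by
  induction h with
  | leaf v => simp [pvMaxOf, pvFlat]
  | node m szl l r hl hr hsz hm ihl ihr =>
    show f ≤ m ↔ _
    rw [hm, le_max_iff, ihl, ihr]
    simp only [pvFlat, List.mem_append]
    aesop

theorem pvQuery_spec {t : PvTree} (h : PvGood t) (f : Int) :
    pvQuery t f = (pvFlat t).findIdx? (fun b => f ≤ b) := by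
  induction h with
  | leaf v => simp [pvQuery, pvFlat, List.findIdx?_cons]
  | node m szl l r hl hr hsz hm ihl ihr =>
    simp only [pvQuery, pvFlat, List.findIdx?_append, ihl, ihr]
    by_cases h1 : m < f
    · have hfl : List.findIdx? (fun b => decide (f ≤ b)) (pvFlat l) = none := by
        rw [List.findIdx?_eq_none_iff]
        intro x hx
        simp only [decide_eq_false_iff_not]
        intro hfx
        have h2 : f ≤ pvMaxOf l := (pvMaxOf_spec hl f).2 ⟨x, hx, hfx⟩
        have h3 : pvMaxOf l ≤ m := by rw [hm]; exact le_max_left _ _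
        omega
      have hfr : List.findIdx? (fun b => decide (f ≤ b)) (pvFlat r) = none := by
        rw [List.findIdx?_eq_none_iff]
        intro x hx
        simp only [decide_eq_false_iff_not]
        intro hfx
        have h2 : f ≤ pvMaxOf r := (pvMaxOf_spec hr f).2 ⟨x, hx, hfx⟩
        have h3 : pvMaxOf r ≤ m := by rw [hm]; exact le_max_right _ _
        omega
      simp [h1, hfl, hfr]
    · by_cases h2 : f ≤ pvMaxOf l
      · have hs : (List.findIdx? (fun b => decide (f ≤ b)) (pvFlat l)).isSome := by
          rw [List.findIdx?_isSome]
          obtain ⟨x, hx, hfx⟩ := (pvMaxOf_spec hl f).1 h2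
          exact List.any_eq_true.2 ⟨x, hx, by simpa⟩
        cases hq : List.findIdx? (fun b => decide (f ≤ b)) (pvFlat l) with
        | none => rw [hq] at hs; simp at hs
        | some j => simp [h1, h2]
      · have hfl : List.findIdx? (fun b => decide (f ≤ b)) (pvFlat l) = none := by
          rw [List.findIdx?_eq_none_iff]
          intro x hx
          simp only [decide_eq_false_iff_not]
          intro hfx
          exact h2 ((pvMaxOf_spec hl f).2 ⟨x, hx, hfx⟩)
        simp only [h1, h2, if_false, hfl, Option.none_or]
        cases List.findIdx? (fun b => decide (f ≤ b)) (pvFlat r) <;>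
          simp [hsz, Nat.add_comm]

theorem pvUpdate_spec {t : PvTree} (h : PvGood t) (i : Nat) (hi : i < (pvFlat t).length) :
    pvFlat (pvUpdate t i) = (pvFlat t).set i (-1) ∧ PvGood (pvUpdate t i) := by
  induction h generalizing i with
  | leaf v =>
    simp only [pvFlat, List.length_singleton] at hi
    interval_cases i
    exact ⟨rfl, PvGood.leaf _⟩
  | node m szl l r hl hr hsz hm ihl ihr =>
    simp only [pvFlat, List.length_append] at hi
    by_cases hc : i < (pvFlat l).length
    · obtain ⟨hfl, hgl⟩ := ihl i hc
      simp only [pvUpdate, hsz, if_pos hc, pvFlat, List.set_append]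
      refine ⟨by simp [hfl], ?_⟩
      exact PvGood.node _ _ _ _ hgl hr (by rw [hfl, List.length_set]) rfl
    · obtain ⟨hfr, hgr⟩ := ihr (i - (pvFlat l).length) (by omega)
      simp only [pvUpdate, hsz, if_neg hc, pvFlat, List.set_append]
      refine ⟨by simp [hfr], ?_⟩
      exact PvGood.node _ _ _ _ hl hgr rfl rfl

theorem pvFlat_build (bs : List Int) (h : bs ≠ []) : pvFlat (pvBuild bs) = bs := by
  fun_induction pvBuild bs with
  | case1 => exact absurd rfl h
  | case2 v => rfl
  | case3 a b rest bs' mid l r ih1 ih2 =>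
    simp only [pvFlat]
    rw [ih1 (by simp [bs', mid, List.take_eq_nil_iff]),
        ih2 (by simp [bs', mid, List.drop_eq_nil_iff]; omega)]
    exact List.take_append_drop _ _

theorem pvGood_build (bs : List Int) : PvGood (pvBuild bs) := by
  fun_induction pvBuild bs with
  | case1 => exact PvGood.leaf _
  | case2 v => exact PvGood.leaf _
  | case3 a b rest bs' mid l r ih1 ih2 =>
    refine PvGood.node _ _ _ _ ih1 ih2 ?_ rfl
    rw [pvFlat_build _ (by simp [bs', mid, List.take_eq_nil_iff])]
    simp [bs', mid]
    omega

theorem pvAInner_spec (f : Int) (bs : List Int) :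
    pvAInner f bs = match bs.findIdx? (fun b => f ≤ b) with
      | some i => (bs.set i (-1), true)
      | none => (bs, false) := by
  induction bs with
  | nil => simp [pvAInner]
  | cons b rest ih =>
    simp only [pvAInner, List.findIdx?_cons]
    by_cases hb : f ≤ b
    · simp [hb]
    · simp only [hb, decide_false, if_false, ih]
      cases List.findIdx? (fun x => decide (f ≤ x)) rest <;> simp

theorem pvMain (fruits : List Int) (u : Int) (bs : List Int) (t : PvTree)
    (hg : PvGood t) (hf : pvFlat t = bs) :
    (fruits.foldl (fun st fruit =>
      let res := pvAInner fruit st.2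
      (if res.2 then st.1 else st.1 + 1, res.1)) (u, bs)).1 =
    (fruits.foldl (fun st f =>
      match pvQuery st.2 f with
      | none => (st.1 + 1, st.2)
      | some j => (st.1, pvUpdate st.2 j)) (u, t)).1 := by
  induction fruits generalizing u bs t with
  | nil => rfl
  | cons f fs ih =>
    simp only [List.foldl_cons]
    rw [pvQuery_spec hg, hf, pvAInner_spec]
    cases hq : bs.findIdx? (fun b => f ≤ b) with
    | none => exact ih (u + 1) bs t hg hf
    | some j =>
      have hj : j < (pvFlat t).length :=
        (List.findIdx?_eq_some_iff_findIdx_eq.1 (by rw [hf]; exact hq)).1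
      obtain ⟨hfl, hgd⟩ := pvUpdate_spec hg j hj
      exact ih u (bs.set j (-1)) (pvUpdate t j) hgd (by rw [hfl, hf])
theorem pvEmpty (fruits : List Int) (u : Int) :
    (fruits.foldl (fun st fruit =>
      let res := pvAInner fruit st.2
      (if res.2 then st.1 else st.1 + 1, res.1)) (u, ([] : List Int))).1 =
    u + fruits.length := by
  induction fruits generalizing u with
  | nil => simp
  | cons f fs ih => simp [pvAInner, ih]; ring

-- ===== VERDICT (by name: the statement is the Claim_ definition above) =====
theorem unplaced_fruits_spec : Claim_equal_unplaced_fruits := by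
  intro fruits baskets _
  unfold Spec_unplaced_fruits unplaced_fruits unplaced_fruits_alt
  match baskets with
  | [] => simpa using pvEmpty fruits 0
  | b :: bs =>
    exact pvMain fruits 0 (b :: bs) (pvBuild (b :: bs)) (pvGood_build _)
      (pvFlat_build _ (by simp))
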